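-- pv_equiv track=rewrite | github.com/weixinn/112termproject | ProjectCodebase/VersionControl/v4/helperFunctions.py | isLegalBoard
-- ===== SOURCE A (Python) =====
-- def isLegalBoard(board):
--     if board == []:
--         return False
--
--     maxRow, maxCol = len(board)-1, len(board[0])-1
--     directions = [(0,-1),(0,1),(-1,0),(1,0)] # up, down, left, right
--     # dictionary of each position on the board and whether or not it has a valid way out
--     visited = {}
--
--     # for a given board and row & col, check that there is always a way out
--     # of any blank spots so there are no isolated "pockets" that cannot be accessed
--     def pathExists(board, row, col):
--         seen = set()
--
--         def solve(board, row, col):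
--             if (row,col) in visited:
--                 solution = visited[(row,col)]
--                 return solution
--
--             elif (row,col) in seen:
--                 return False
--
--             elif row == 0 or col == 0 or row==maxRow or col == maxCol:
--                 return True
--
--             else:
--                 seen.add((row,col))
--                 for move in directions:
--                     dCol, dRow = move
--                     newRow = row + dRow
--                     newCol = col + dCol
--
--                     if board[newRow][newCol] == 0:
--                         solution = solve(board, newRow, newCol)
--                         if solution == True:
--                             return solution
--                 return False
--
--         result = solve(board, row, col)
--         visited[(row,col)] = result
--         return result
--
--     for row in range (len(board)):
--         for col in range (len(board[0])):
--             if board[row][col] == 0: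
--                 if pathExists(board, row, col) != True:
--                     return False
--     return True
-- ===== SOURCE B (Python) =====
-- def isLegalBoard(board):
--     # Multi-source flood fill from the blank border cells; the board is legal
--     # iff every blank cell is reached.  (The four neighbours of a cell are
--     # pairwise distinct, so filtering them against `reached` in one step is
--     # the same as testing them one by one.)
--     if board == []:
--         return False
--     rows, cols = len(board), len(board[0])
--     seeds = [(r, c)
--              for r in range(rows) for c in range(cols)
--              if (r == 0 or c == 0 or r == rows - 1 or c == cols - 1)
--              and board[r][c] == 0]
--     reached = set(seeds)
--     stack = list(seeds)
--     while stack: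
--         r, c = stack.pop()
--         new = [(nr, nc)
--                for nr, nc in ((r - 1, c), (r + 1, c), (r, c - 1), (r, c + 1))
--                if 0 <= nr < rows and 0 <= nc < cols
--                and (nr, nc) not in reached and board[nr][nc] == 0]
--         reached.update(new)
--         stack.extend(new)
--     return all(board[r][c] != 0 or (r, c) in reached
--                for r in range(rows) for c in range(cols))
-- ===== Notes on version B (the rewrite author's own statement) =====
-- stated objective: alternative
-- what changed: A decides reachability separately for every blank cell with a memoized DFS toward the border; B runs one multi-source flood fill outward from the blank border cells and then checks that every blank cell was reached.
-- outside the precondition, e.g. on isLegalBoard([[1, 1, 1], [1, 0, 1], [1, 1, 1], [1]]): A returns False, B raises IndexError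
import Mathlib
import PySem

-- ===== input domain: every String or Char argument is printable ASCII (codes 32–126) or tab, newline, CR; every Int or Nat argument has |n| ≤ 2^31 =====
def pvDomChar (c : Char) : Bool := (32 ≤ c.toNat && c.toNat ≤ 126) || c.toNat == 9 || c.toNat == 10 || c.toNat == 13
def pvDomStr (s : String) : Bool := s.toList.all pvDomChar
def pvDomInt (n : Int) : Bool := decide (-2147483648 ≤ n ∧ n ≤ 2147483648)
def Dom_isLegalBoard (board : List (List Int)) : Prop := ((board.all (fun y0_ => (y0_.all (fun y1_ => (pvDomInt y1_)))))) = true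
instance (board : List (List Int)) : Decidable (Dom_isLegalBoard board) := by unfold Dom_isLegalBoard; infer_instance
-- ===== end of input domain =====

-- B replaces A's per-blank-cell memoized DFS towards the border by ONE
-- multi-source flood fill from the blank border cells (legal iff every blank
-- cell is reached); equality of the returned Bool is proved on Pre_.

-- ===== PORT A =====

-- board[r][c]; within Pre_ every access either program makes has
-- 0 ≤ r < len(board) and 0 ≤ c < len(board[r]), so the default 1 is never
-- read where Python would raise (exact on Pre_).
def pvCell (board : List (List Int)) (r c : Int) : Int :=
  if 0 ≤ r ∧ 0 ≤ c then (board.getD r.toNat []).getD c.toNat 1 else 1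

def pvDirections : List (Int × Int) := [(0,-1),(0,1),(-1,0),(1,0)]

-- the `for move in directions` loop of `solve`, with early return on True;
-- `solveFn` is the recursive call (one fuel step lower).
def pvTryMoves (board : List (List Int))
    (solveFn : Int → Int → PySem.Set (Int × Int) → Bool × PySem.Set (Int × Int)) :
    List (Int × Int) → Int → Int → PySem.Set (Int × Int) → Bool × PySem.Set (Int × Int)
  | [], _, _, seen => (false, seen)
  | (dCol, dRow) :: rest, row, col, seen =>
    let newRow := row + dRow
    let newCol := col + dCol
    if pvCell board newRow newCol = 0 then
      match solveFn newRow newCol seen with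
      | (true, seen') => (true, seen')
      | (false, seen') => pvTryMoves board solveFn rest row col seen'
    else pvTryMoves board solveFn rest row col seen

-- `solve`, with the mutable `seen` threaded through and a fuel counter as
-- the totality guard (each nested call puts a fresh cell into `seen`, so the
-- fuel supplied by pvPathExists is never exhausted; see pvSolve_spec).
def pvSolve (board : List (List Int)) (maxRow maxCol : Int)
    (visited : PySem.Dict (Int × Int) Bool) :
    Nat → Int → Int → PySem.Set (Int × Int) → Bool × PySem.Set (Int × Int)
  | 0, _, _, seen => (false, seen)
  | fuel+1, row, col, seen =>
    match visited.get? (row, col) with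
    | some b => (b, seen)
    | none =>
      if (row, col) ∈ seen then (false, seen)
      else if row = 0 ∨ col = 0 ∨ row = maxRow ∨ col = maxCol then (true, seen)
      else pvTryMoves board (pvSolve board maxRow maxCol visited fuel)
        pvDirections row col (PySem.Set.add seen (row, col))

-- `pathExists`: fresh `seen`, result recorded in `visited`.
def pvPathExists (board : List (List Int)) (maxRow maxCol : Int)
    (visited : PySem.Dict (Int × Int) Bool) (row col : Int) :
    Bool × PySem.Dict (Int × Int) Bool :=
  let r := pvSolve board maxRow maxCol visited
    (board.length * (board.headD []).length + 1) row col PySem.Set.empty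
  (r.1, visited.insert (row, col) r.1)

def isLegalBoard (board : List (List Int)) : Bool :=
  if board = [] then false
  else
    let maxRow : Int := (board.length : Int) - 1
    let maxCol : Int := ((board.headD []).length : Int) - 1
    -- the two nested `for` loops with the early `return False` as a flag fold
    ((PySem.List.pyRange 0 (board.length : Int)).foldl
      (fun acc row =>
        (PySem.List.pyRange 0 ((board.headD []).length : Int)).foldl
          (fun acc col =>
            if acc.1 = false then acc
            else if pvCell board row col = 0 then
              let r := pvPathExists board maxRow maxCol acc.2 row col
              (r.1, r.2)
            else acc)
          acc)
      (true, PySem.Dict.empty)).1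

-- ===== PORT B =====

-- the rows×cols grid positions (used only to measure the flood-fill loop)
def pvCellsRC (rows cols : Int) : List (Int × Int) :=
  (PySem.List.pyRange 0 rows).flatMap
    (fun r => (PySem.List.pyRange 0 cols).map (fun c => (r, c)))

theorem mem_pvCellsRC {rows cols : Int} {q : Int × Int} :
    q ∈ pvCellsRC rows cols ↔ 0 ≤ q.1 ∧ q.1 < rows ∧ 0 ≤ q.2 ∧ q.2 < cols := by
  obtain ⟨x, y⟩ := q
  simp only [pvCellsRC, List.mem_flatMap, List.mem_map, PySem.List.mem_pyRange_one]
  constructor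
  · rintro ⟨r, hr, c, hc, h⟩
    rw [Prod.mk.injEq] at h
    obtain ⟨rfl, rfl⟩ := h
    exact ⟨hr.1, hr.2, hc.1, hc.2⟩
  · rintro ⟨h1, h2, h3, h4⟩
    exact ⟨x, ⟨h1, h2⟩, y, ⟨h3, h4⟩, rfl⟩

def pvUnseen (rows cols : Int) (reached : PySem.Set (Int × Int)) : Nat :=
  ((pvCellsRC rows cols).filter (fun q => decide (q ∉ reached))).length

theorem pvUnseen_append (rows cols : Int) (reached : PySem.Set (Int × Int))
    (new : List (Int × Int)) (h1 : ∀ q ∈ new, q ∈ pvCellsRC rows cols ∧ q ∉ reached)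
    (h2 : new.Nodup) :
    pvUnseen rows cols (reached ++ new) + new.length ≤ pvUnseen rows cols reached := by
  classical
  unfold pvUnseen
  have hsplit : (pvCellsRC rows cols).filter (fun q => decide (q ∉ reached ++ new))
      = ((pvCellsRC rows cols).filter (fun q => decide (q ∉ reached))).filter
          (fun q => decide (q ∉ new)) := by
    rw [List.filter_filter]
    apply List.filter_congr
    intro x _
    have : (x ∉ reached ++ new) ↔ (x ∉ new ∧ x ∉ reached) := by
      simp only [List.mem_append, not_or]; tauto
    simp only [this, decide_not]
    simp

  rw [hsplit]
  set L := (pvCellsRC rows cols).filter (fun q => decide (q ∉ reached)) with hL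
  have hsub : new ⊆ L := by
    intro q hq
    rw [hL, List.mem_filter]
    exact ⟨(h1 q hq).1, by simpa using (h1 q hq).2⟩
  have hsp : List.Subperm new L := h2.subperm hsub
  have hcount : new.length ≤ L.countP (fun q => decide (q ∈ new)) := by
    calc new.length = new.countP (fun q => decide (q ∈ new)) := by
          symm; rw [List.countP_eq_length]; intro a ha; simpa using ha
      _ ≤ L.countP (fun q => decide (q ∈ new)) := hsp.countP_le _
  have hfc : (L.filter (fun q => decide (q ∉ new))).length = L.countP (fun q => decide (q ∉ new)) :=
    (List.countP_eq_length_filter ..).symm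
  rw [hfc]
  have h := List.length_eq_countP_add_countP (p := fun q => decide (q ∈ new)) (l := L)
  have h2 : L.countP (fun a => decide (¬(decide (a ∈ new) = true))) = L.countP (fun q => decide (q ∉ new)) := by
    apply List.countP_congr; intro a _; simp
  omega

def pvNbrs (r c : Int) : List (Int × Int) := [(r - 1, c), (r + 1, c), (r, c - 1), (r, c + 1)]

def pvNbrOk (board : List (List Int)) (rows cols : Int)
    (reached : PySem.Set (Int × Int)) (q : Int × Int) : Bool :=
  decide (0 ≤ q.1 ∧ q.1 < rows) && decide (0 ≤ q.2 ∧ q.2 < cols) &&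
    !(PySem.Set.contains reached q) && decide (pvCell board q.1 q.2 = 0)

theorem pvNbrs_nodup (r c : Int) : (pvNbrs r c).Nodup := by
  simp [pvNbrs, Prod.ext_iff]
  omega

theorem pvNew_facts (board : List (List Int)) (rows cols : Int)
    (reached : PySem.Set (Int × Int)) (r c : Int) :
    (((pvNbrs r c).filter (pvNbrOk board rows cols reached)).Nodup)
    ∧ ∀ q ∈ (pvNbrs r c).filter (pvNbrOk board rows cols reached),
        q ∈ pvCellsRC rows cols ∧ q ∉ reached := by
  refine ⟨(pvNbrs_nodup r c).filter _, ?_⟩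
  intro q hq
  rw [List.mem_filter] at hq
  have h := hq.2
  unfold pvNbrOk at h
  simp only [Bool.and_eq_true, decide_eq_true_eq, Bool.not_eq_true'] at h
  refine ⟨mem_pvCellsRC.mpr ⟨h.1.1.1.1, h.1.1.1.2, h.1.1.2.1, h.1.1.2.2⟩, ?_⟩
  have := h.1.2
  simpa [PySem.Set.contains_eq_listContains] using this

-- the `while stack` flood-fill loop
def pvFlood (board : List (List Int)) (rows cols : Int)
    (reached : PySem.Set (Int × Int)) (stack : List (Int × Int)) :
    PySem.Set (Int × Int) :=
  match stack with
  | [] => reached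
  | (r, c) :: rest =>
    let new := (pvNbrs r c).filter (pvNbrOk board rows cols reached)
    pvFlood board rows cols (PySem.Set.update reached new) (new.reverse ++ rest)
  termination_by (5 * pvUnseen rows cols reached + stack.length)
  decreasing_by
    have hf := pvNew_facts board rows cols reached r c
    have hupd := PySem.Set.update_eq_append_of_disjoint reached
      ((pvNbrs r c).filter (pvNbrOk board rows cols reached)) hf.1
      (fun x hx => (hf.2 x hx).2)
    have hle := pvUnseen_append rows cols reached
      ((pvNbrs r c).filter (pvNbrOk board rows cols reached))
      hf.2 hf.1
    simp only [hupd, List.length_append, List.length_reverse, List.length_cons]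
    omega

def isLegalBoard_alt (board : List (List Int)) : Bool :=
  if board = [] then false
  else
    let rows : Int := (board.length : Int)
    let cols : Int := ((board.headD []).length : Int)
    let seeds := (PySem.List.pyRange 0 rows).foldl
      (fun acc r => (PySem.List.pyRange 0 cols).foldl
        (fun acc c =>
          if (decide (r = 0 ∨ c = 0 ∨ r = rows - 1 ∨ c = cols - 1)
              && decide (pvCell board r c = 0)) = true
          then acc ++ [(r, c)] else acc)
        acc) []
    let reached := pvFlood board rows cols (PySem.Set.ofList seeds) seeds
    (PySem.List.pyRange 0 rows).all (fun r =>
      (PySem.List.pyRange 0 cols).all (fun c =>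
        !(decide (pvCell board r c = 0)) || PySem.Set.contains reached (r, c)))

-- ===== PRECONDITION & SPEC =====
-- Pre_ excludes ragged boards with a row shorter than the first row: on those
-- Python A raises IndexError whenever such a cell is scanned (it returns only
-- when an illegal pocket is found before reaching the short row, and B raises
-- IndexError on those boards).
def Pre_isLegalBoard (board : List (List Int)) : Prop :=
  ∀ row ∈ board, (board.headD []).length ≤ row.length
instance (board : List (List Int)) : Decidable (Pre_isLegalBoard board) := by
  unfold Pre_isLegalBoard; infer_instance

def pvWitness_isLegalBoard : List (List Int) := [[1, 0, 1], [0, 0, 1], [1, 1, 1]]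

def Spec_isLegalBoard (board : List (List Int)) (out : Bool) : Prop := out = isLegalBoard_alt board
instance (board : List (List Int)) (out : Bool) : Decidable (Spec_isLegalBoard board out) := by unfold Spec_isLegalBoard; infer_instance

-- ===== CLAIM (what is proved, stated in full; the proofs are below) =====
def Claim_equal_isLegalBoard : Prop := ∀ (board : List (List Int)), Dom_isLegalBoard board → Pre_isLegalBoard board → Spec_isLegalBoard board (isLegalBoard board)

-- ===== LEMMAS AND PROOFS =====

-- the reachability specification both programs are reduced to
def pvRowsI (board : List (List Int)) : Int := (board.length : Int)
def pvColsI (board : List (List Int)) : Int := ((board.headD []).length : Int)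

def pvInGrid (board : List (List Int)) (p : Int × Int) : Prop :=
  0 ≤ p.1 ∧ p.1 < pvRowsI board ∧ 0 ≤ p.2 ∧ p.2 < pvColsI board

def pvBlankP (board : List (List Int)) (p : Int × Int) : Prop :=
  pvInGrid board p ∧ pvCell board p.1 p.2 = 0

def pvBorderP (board : List (List Int)) (p : Int × Int) : Prop :=
  p.1 = 0 ∨ p.2 = 0 ∨ p.1 = pvRowsI board - 1 ∨ p.2 = pvColsI board - 1

-- blank cells connected (through blank cells) to a blank border cell
inductive pvConn (board : List (List Int)) : Int × Int → Prop where
  | base (p : Int × Int) : pvBlankP board p → pvBorderP board p → pvConn board p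
  | step (p q : Int × Int) : pvConn board p → q ∈ pvNbrs p.1 p.2 → pvBlankP board q →
      pvConn board q

theorem pvConn_blank {board : List (List Int)} {p : Int × Int} (h : pvConn board p) :
    pvBlankP board p := by
  cases h with
  | base _ hb _ => exact hb
  | step _ _ _ _ hb => exact hb

theorem pvNbrs_symm {p q : Int × Int} (h : q ∈ pvNbrs p.1 p.2) : p ∈ pvNbrs q.1 q.2 := by
  obtain ⟨a, b⟩ := p
  obtain ⟨x, y⟩ := q
  simp only [pvNbrs, List.mem_cons, List.not_mem_nil, or_false, Prod.mk.injEq] at h ⊢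
  omega

-- ---- A-side ----

def MInvP (board : List (List Int)) (visited : PySem.Dict (Int × Int) Bool) : Prop :=
  ∀ p b, visited.get? p = some b → pvBlankP board p ∧ (b = true ↔ pvConn board p)

def DeadCellP (board : List (List Int)) (visited : PySem.Dict (Int × Int) Bool)
    (S : List (Int × Int)) (p : Int × Int) : Prop :=
  ¬ pvBorderP board p ∧
    ∀ q ∈ pvNbrs p.1 p.2, pvBlankP board q → (q ∈ S ∨ visited.get? q = some false)

def SeenOKP (board : List (List Int)) (S : PySem.Set (Int × Int)) : Prop :=
  ∀ p ∈ S, pvBlankP board p ∧ ¬ pvBorderP board p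

theorem pvUnseen_mono (rows cols : Int) (S T : PySem.Set (Int × Int)) (h : ∀ x ∈ S, x ∈ T) :
    pvUnseen rows cols T ≤ pvUnseen rows cols S := by
  unfold pvUnseen
  rw [← List.countP_eq_length_filter, ← List.countP_eq_length_filter]
  apply List.countP_mono_left
  intro x _ hx
  simp only [decide_eq_true_eq] at hx ⊢
  exact fun hxS => hx (h x hxS)

-- the full functional specification of `solve` (both result components)
def SolveConcl (board : List (List Int)) (visited : PySem.Dict (Int × Int) Bool)
    (row col : Int) (seen : PySem.Set (Int × Int)) (res : Bool × PySem.Set (Int × Int)) : Prop :=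
  ∃ extra, res.2 = seen ++ extra ∧
    (∀ p ∈ extra, pvBlankP board p ∧ ¬ pvBorderP board p) ∧
    (res.1 = true → pvConn board (row, col)) ∧
    (res.1 = false →
      ((row, col) ∈ seen ++ extra ∨ visited.get? (row, col) = some false) ∧
      ∀ p ∈ extra, DeadCellP board visited (seen ++ extra) p)

theorem pvTarget_inGrid {board : List (List Int)} {row col : Int} {mv : Int × Int}
    (hb : pvBlankP board (row, col)) (hnb : ¬ pvBorderP board (row, col))
    (hmv : mv ∈ pvDirections) :
    pvInGrid board (row + mv.2, col + mv.1) := by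
  obtain ⟨dc, dr⟩ := mv
  have hg := hb.1
  simp only [pvDirections, List.mem_cons, List.not_mem_nil, or_false, Prod.mk.injEq] at hmv
  simp only [pvInGrid] at hg ⊢
  simp only [pvBorderP, not_or] at hnb
  rcases hmv with ⟨rfl, rfl⟩ | ⟨rfl, rfl⟩ | ⟨rfl, rfl⟩ | ⟨rfl, rfl⟩ <;> simp at hg ⊢ <;> omega

theorem pvTarget_mem_nbrs {row col : Int} {mv : Int × Int} (hmv : mv ∈ pvDirections) :
    (row + mv.2, col + mv.1) ∈ pvNbrs row col := by
  simp only [pvDirections, List.mem_cons, List.not_mem_nil, or_false] at hmv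
  rcases hmv with ⟨rfl, rfl⟩ | ⟨rfl, rfl⟩ | ⟨rfl, rfl⟩ | ⟨rfl, rfl⟩ <;>
    simp [pvNbrs, Prod.ext_iff] <;> omega

theorem pvNbrs_to_moves {row col : Int} {q : Int × Int} (h : q ∈ pvNbrs row col) :
    ∃ mv ∈ pvDirections, q = (row + mv.2, col + mv.1) := by
  simp only [pvNbrs, List.mem_cons, List.not_mem_nil, or_false] at h
  rcases h with rfl | rfl | rfl | rfl
  · exact ⟨(0, -1), by simp [pvDirections], by rw [Prod.mk.injEq]; constructor <;> omega⟩
  · exact ⟨(0, 1), by simp [pvDirections], by rw [Prod.mk.injEq]; constructor <;> omega⟩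
  · exact ⟨(-1, 0), by simp [pvDirections], by rw [Prod.mk.injEq]; constructor <;> omega⟩
  · exact ⟨(1, 0), by simp [pvDirections], by rw [Prod.mk.injEq]; constructor <;> omega⟩

theorem pvDeadCell_mono {board : List (List Int)} {visited : PySem.Dict (Int × Int) Bool}
    {S S' : List (Int × Int)} {p : Int × Int}
    (hs : ∀ x ∈ S, x ∈ S') (h : DeadCellP board visited S p) : DeadCellP board visited S' p :=
  ⟨h.1, fun q hq hb => (h.2 q hq hb).elim (fun hx => Or.inl (hs _ hx)) Or.inr⟩

theorem pvTryMoves_spec (board : List (List Int)) (visited : PySem.Dict (Int × Int) Bool)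
    (solveFn : Int → Int → PySem.Set (Int × Int) → Bool × PySem.Set (Int × Int)) (fuel : Nat)
    (hsolve : ∀ (r c : Int) (s : PySem.Set (Int × Int)), pvBlankP board (r, c) →
      SeenOKP board s → pvUnseen (pvRowsI board) (pvColsI board) s < fuel →
      SolveConcl board visited r c s (solveFn r c s)) :
    ∀ (moves : List (Int × Int)), (∀ mv ∈ moves, mv ∈ pvDirections) →
    ∀ (row col : Int) (seen : PySem.Set (Int × Int)),
      pvBlankP board (row, col) → ¬ pvBorderP board (row, col) →
      SeenOKP board seen → pvUnseen (pvRowsI board) (pvColsI board) seen < fuel →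
      ∃ extra, (pvTryMoves board solveFn moves row col seen).2 = seen ++ extra ∧
        (∀ p ∈ extra, pvBlankP board p ∧ ¬ pvBorderP board p) ∧
        ((pvTryMoves board solveFn moves row col seen).1 = true → pvConn board (row, col)) ∧
        ((pvTryMoves board solveFn moves row col seen).1 = false →
          (∀ mv ∈ moves, pvBlankP board (row + mv.2, col + mv.1) →
            ((row + mv.2, col + mv.1) ∈ seen ++ extra ∨
              visited.get? (row + mv.2, col + mv.1) = some false)) ∧
          ∀ p ∈ extra, DeadCellP board visited (seen ++ extra) p) := by
  intro moves
  induction moves with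
  | nil =>
    intro _ row col seen _ _ _ _
    refine ⟨[], by simp [pvTryMoves], by simp, by simp [pvTryMoves], ?_⟩
    intro _
    exact ⟨by simp, by simp⟩
  | cons mv rest ih =>
    intro hmoves row col seen hb hnb hseen hfuel
    obtain ⟨dCol, dRow⟩ := mv
    have hmv : ((dCol, dRow) : Int × Int) ∈ pvDirections := hmoves _ (by simp)
    rw [show pvTryMoves board solveFn ((dCol, dRow) :: rest) row col seen
        = (if pvCell board (row + dRow) (col + dCol) = 0 then
            match solveFn (row + dRow) (col + dCol) seen with
            | (true, seen') => (true, seen')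
            | (false, seen') => pvTryMoves board solveFn rest row col seen'
          else pvTryMoves board solveFn rest row col seen) from rfl]
    by_cases hcell : pvCell board (row + dRow) (col + dCol) = 0
    · -- target is blank: recursive solve call
      have htb : pvBlankP board (row + dRow, col + dCol) :=
        ⟨pvTarget_inGrid hb hnb hmv, hcell⟩
      have hsc := hsolve (row + dRow) (col + dCol) seen htb hseen hfuel
      obtain ⟨e1, he1, he1ok, htrue, hfalse⟩ := hsc
      rw [if_pos hcell]
      cases hres : solveFn (row + dRow) (col + dCol) seen with
      | mk b s' =>
        rw [hres] at he1 htrue hfalse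
        cases b with
        | true =>
          refine ⟨e1, by simpa using he1, he1ok, ?_, by simp⟩
          intro _
          have hconn := htrue rfl
          exact pvConn.step _ _ hconn (pvNbrs_symm (pvTarget_mem_nbrs hmv)) hb
        | false =>
          -- continue with the remaining moves on the grown seen set
          have he1' : s' = seen ++ e1 := by simpa using he1
          subst he1'
          have hs' : SeenOKP board (seen ++ e1) := by
            intro p hp
            rcases List.mem_append.mp hp with h | h
            · exact hseen p h
            · exact he1ok p h
          have hf' : pvUnseen (pvRowsI board) (pvColsI board) (seen ++ e1) < fuel :=
            lt_of_le_of_lt (pvUnseen_mono _ _ _ _ (fun x hx => List.mem_append.mpr (Or.inl hx))) hfuel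
          obtain ⟨e2, he2, he2ok, htrue2, hfalse2⟩ :=
            ih (fun m hm => hmoves m (by simp [hm])) row col (seen ++ e1) hb hnb hs' hf'
          refine ⟨e1 ++ e2, ?_, ?_, htrue2, ?_⟩
          · rw [show ((match ((false : Bool), seen ++ e1) with
                | (true, seen') => ((true : Bool), seen')
                | (false, seen') => pvTryMoves board solveFn rest row col seen') :
                  Bool × PySem.Set (Int × Int)) = pvTryMoves board solveFn rest row col (seen ++ e1) from rfl,
              he2, List.append_assoc]
          · intro p hp
            rcases List.mem_append.mp hp with h | h
            · exact he1ok p h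
            · exact he2ok p h
          · intro hres0
            have h2 := hfalse2 (by simpa using hres0)
            have hsub1 : ∀ x ∈ seen ++ e1, x ∈ seen ++ (e1 ++ e2) := by
              intro x hx
              rcases List.mem_append.mp hx with h | h
              · exact List.mem_append.mpr (Or.inl h)
              · exact List.mem_append.mpr (Or.inr (List.mem_append.mpr (Or.inl h)))
            have hsub2 : ∀ x ∈ (seen ++ e1) ++ e2, x ∈ seen ++ (e1 ++ e2) := by
              intro x hx
              rw [List.append_assoc] at hx
              exact hx
            constructor
            · intro m hm hbt
              rcases List.mem_cons.mp hm with rfl | hm'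
              · rcases (hfalse rfl).1 with h | h
                · exact Or.inl (hsub1 _ (by simpa using h))
                · exact Or.inr h
              · rcases (h2.1 m hm' hbt) with h | h
                · exact Or.inl (hsub2 _ h)
                · exact Or.inr h
            · intro p hp
              rcases List.mem_append.mp hp with h | h
              · -- p from the solve call: dead w.r.t. seen ++ e1
                have hd := (hfalse rfl).2 p h
                exact pvDeadCell_mono hsub1 (by simpa using hd)
              · have hd := h2.2 p h
                exact pvDeadCell_mono hsub2 hd
    · rw [if_neg hcell]
      obtain ⟨e2, he2, he2ok, htrue2, hfalse2⟩ :=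
        ih (fun m hm => hmoves m (by simp [hm])) row col seen hb hnb hseen hfuel
      refine ⟨e2, he2, he2ok, htrue2, ?_⟩
      intro hres0
      have h2 := hfalse2 hres0
      refine ⟨?_, h2.2⟩
      intro m hm hbt
      rcases List.mem_cons.mp hm with rfl | hm'
      · exact absurd hbt.2 hcell
      · exact h2.1 m hm' hbt

theorem pvSolve_spec (board : List (List Int)) (visited : PySem.Dict (Int × Int) Bool)
    (hM : MInvP board visited) :
    ∀ (fuel : Nat) (row col : Int) (seen : PySem.Set (Int × Int)),
      pvBlankP board (row, col) → SeenOKP board seen →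
      pvUnseen (pvRowsI board) (pvColsI board) seen < fuel →
      SolveConcl board visited row col seen
        (pvSolve board (pvRowsI board - 1) (pvColsI board - 1) visited fuel row col seen) := by
  intro fuel
  induction fuel with
  | zero => intro row col seen _ _ hfuel; omega
  | succ fuel ih =>
    intro row col seen hb hseen hfuel
    rw [show pvSolve board (pvRowsI board - 1) (pvColsI board - 1) visited (fuel + 1) row col seen
        = (match visited.get? (row, col) with
          | some b => (b, seen)
          | none =>
            if (row, col) ∈ seen then (false, seen)
            else if row = 0 ∨ col = 0 ∨ row = pvRowsI board - 1 ∨ col = pvColsI board - 1 then (true, seen)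
            else pvTryMoves board (pvSolve board (pvRowsI board - 1) (pvColsI board - 1) visited fuel)
              pvDirections row col (PySem.Set.add seen (row, col))) from rfl]
    cases hv : visited.get? (row, col) with
    | some b =>
      refine ⟨[], by simp, by simp, ?_, ?_⟩
      · intro hbt
        simp only at hbt
        exact ((hM _ b hv).2).mp hbt
      · intro hbf
        simp only at hbf
        subst hbf
        exact ⟨Or.inr hv, by simp⟩
    | none =>
      by_cases hmem : (row, col) ∈ seen
      · rw [if_pos hmem]
        exact ⟨[], by simp, by simp, by simp, fun _ => ⟨Or.inl (by simpa using hmem), by simp⟩⟩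
      · rw [if_neg hmem]
        by_cases hbd : row = 0 ∨ col = 0 ∨ row = pvRowsI board - 1 ∨ col = pvColsI board - 1
        · rw [if_pos hbd]
          exact ⟨[], by simp, by simp, fun _ => pvConn.base _ hb hbd, by simp⟩
        · rw [if_neg hbd]
          have hnb : ¬ pvBorderP board (row, col) := hbd
          have hadd : PySem.Set.add seen (row, col) = seen ++ [(row, col)] :=
            PySem.Set.add_of_not_mem hmem
          have hs1 : SeenOKP board (seen ++ [(row, col)]) := by
            intro p hp
            rcases List.mem_append.mp hp with h | h
            · exact hseen p h
            · rw [List.mem_singleton] at h; subst h; exact ⟨hb, hnb⟩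
          have hcellmem : ((row, col) : Int × Int) ∈ pvCellsRC (pvRowsI board) (pvColsI board) :=
            mem_pvCellsRC.mpr ⟨hb.1.1, hb.1.2.1, hb.1.2.2.1, hb.1.2.2.2⟩
          have hdec := pvUnseen_append (pvRowsI board) (pvColsI board) seen [(row, col)]
            (by intro q hq; rw [List.mem_singleton] at hq; subst hq; exact ⟨hcellmem, hmem⟩)
            (List.nodup_singleton _)
          have hf1 : pvUnseen (pvRowsI board) (pvColsI board) (seen ++ [(row, col)]) < fuel := by
            simp only [List.length_singleton] at hdec
            omega
          have htm := pvTryMoves_spec board visited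
            (pvSolve board (pvRowsI board - 1) (pvColsI board - 1) visited fuel) fuel
            (fun r c s hb' hs' hf' => ih r c s hb' hs' hf')
            pvDirections (fun mv hmv => hmv) row col (seen ++ [(row, col)]) hb hnb hs1 hf1
          obtain ⟨e, he, heok, htrue, hfalse⟩ := htm
          rw [hadd]
          have heq : (seen ++ [(row, col)]) ++ e = seen ++ ((row, col) :: e) := by simp
          refine ⟨(row, col) :: e, by rw [he, heq], ?_, htrue, ?_⟩
          · intro p hp
            rcases List.mem_cons.mp hp with rfl | hp'
            · exact ⟨hb, hnb⟩
            · exact heok p hp'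
          · intro hbf
            have hf2 := hfalse hbf
            refine ⟨Or.inl (by simp), ?_⟩
            intro p hp
            rcases List.mem_cons.mp hp with rfl | hp'
            · refine ⟨hnb, ?_⟩
              intro q hq hbq
              obtain ⟨mv, hmv, rfl⟩ := pvNbrs_to_moves hq
              rcases hf2.1 mv hmv hbq with h | h
              · exact Or.inl (by rw [← heq]; exact h)
              · exact Or.inr h
            · exact pvDeadCell_mono (by rw [heq]; exact fun x hx => hx) (hf2.2 p hp')

theorem pvConn_avoid (board : List (List Int)) (visited : PySem.Dict (Int × Int) Bool)
    (hM : MInvP board visited) (X : List (Int × Int))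
    (hX : ∀ p ∈ X, DeadCellP board visited X p) :
    ∀ p, pvConn board p → p ∉ X ∧ visited.get? p ≠ some false := by
  intro p hconn
  induction hconn with
  | base p hb hbd =>
    refine ⟨fun hpX => (hX p hpX).1 hbd, fun hvf => ?_⟩
    have h2 := (hM p false hvf).2
    exact absurd (h2.mpr (pvConn.base p hb hbd)) (by simp)
  | step p q hc hadj hbq ih =>
    refine ⟨fun hqX => ?_, fun hvf => ?_⟩
    · have hd := hX q hqX
      have hpn : p ∈ pvNbrs q.1 q.2 := pvNbrs_symm hadj
      have hpb : pvBlankP board p := pvConn_blank hc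
      rcases hd.2 p hpn hpb with h | h
      · exact ih.1 h
      · exact ih.2 h
    · have h2 := (hM q false hvf).2
      exact absurd (h2.mpr (pvConn.step p q hc hadj hbq)) (by simp)

theorem pvPathExists_spec (board : List (List Int)) (visited : PySem.Dict (Int × Int) Bool)
    (row col : Int) (hM : MInvP board visited) (hb : pvBlankP board (row, col)) :
    ((pvPathExists board (pvRowsI board - 1) (pvColsI board - 1) visited row col).1 = true
      ↔ pvConn board (row, col)) ∧
    MInvP board (pvPathExists board (pvRowsI board - 1) (pvColsI board - 1) visited row col).2 := by
  have hlen : (pvCellsRC (pvRowsI board) (pvColsI board)).length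
      = board.length * (board.headD []).length := by
    simp [pvCellsRC, List.length_flatMap, PySem.List.length_pyRange_one, pvRowsI, pvColsI,
      List.map_const', List.sum_replicate, smul_eq_mul]
  have hempty : pvUnseen (pvRowsI board) (pvColsI board) PySem.Set.empty
      = board.length * (board.headD []).length := by
    rw [← hlen]
    unfold pvUnseen
    have : (pvCellsRC (pvRowsI board) (pvColsI board)).filter
        (fun q => decide (q ∉ (PySem.Set.empty : PySem.Set (Int × Int)))) =
        pvCellsRC (pvRowsI board) (pvColsI board) := by
      apply List.filter_eq_self.mpr
      intro a _
      simp [PySem.Set.empty]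
    rw [this]
  have hsc := pvSolve_spec board visited hM
    (board.length * (board.headD []).length + 1) row col PySem.Set.empty hb
    (by intro p hp; exact absurd hp (List.not_mem_nil))
    (by rw [hempty]; exact Nat.lt_succ_self _)
  obtain ⟨extra, hex, _, htrue, hfalse⟩ := hsc
  set r := pvSolve board (pvRowsI board - 1) (pvColsI board - 1) visited
    (board.length * (board.headD []).length + 1) row col PySem.Set.empty with hr
  have hiff : r.1 = true ↔ pvConn board (row, col) := by
    constructor
    · exact htrue
    · intro hconn
      cases hres1 : r.1 with
      | true => rfl
      | false =>
        exfalso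
        obtain ⟨hin, hdead⟩ := hfalse hres1
        simp only [PySem.Set.empty, List.nil_append] at hin hdead
        have hav := pvConn_avoid board visited hM extra hdead (row, col) hconn
        rcases hin with h | h
        · exact hav.1 h
        · exact hav.2 h
  constructor
  · exact hiff
  · intro p b hget
    rw [show (pvPathExists board (pvRowsI board - 1) (pvColsI board - 1) visited row col).2
        = visited.insert (row, col) r.1 from rfl] at hget
    rw [PySem.Dict.get?_insert] at hget
    by_cases hpe : p = (row, col)
    · rw [if_pos hpe] at hget
      have hb' : b = r.1 := by injection hget with h; exact h.symm
      subst hb'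
      subst hpe
      exact ⟨hb, hiff⟩
    · rw [if_neg hpe] at hget
      exact hM p b hget

-- the body of A's double scan loop
def pvStepA (board : List (List Int)) (acc : Bool × PySem.Dict (Int × Int) Bool)
    (p : Int × Int) : Bool × PySem.Dict (Int × Int) Bool :=
  if acc.1 = false then acc
  else if pvCell board p.1 p.2 = 0 then
    let r := pvPathExists board (pvRowsI board - 1) (pvColsI board - 1) acc.2 p.1 p.2
    (r.1, r.2)
  else acc

theorem pvLoopA_false (board : List (List Int)) :
    ∀ (L : List (Int × Int)) (visited : PySem.Dict (Int × Int) Bool),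
      (L.foldl (pvStepA board) (false, visited)).1 = false := by
  intro L
  induction L with
  | nil => intro visited; rfl
  | cons p L ih =>
    intro visited
    have : pvStepA board (false, visited) p = (false, visited) := by
      simp [pvStepA]
    simpa [this] using ih visited

theorem pvLoopA_spec (board : List (List Int)) :
    ∀ (L : List (Int × Int)) (visited : PySem.Dict (Int × Int) Bool),
      MInvP board visited → (∀ p ∈ L, pvInGrid board p) →
      ((L.foldl (pvStepA board) (true, visited)).1 = true
        ↔ ∀ p ∈ L, pvCell board p.1 p.2 = 0 → pvConn board p) := by
  intro L
  induction L with
  | nil => intro visited _ _; simp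
  | cons p L ih =>
    intro visited hM hL
    have hgrid := hL p (by simp)
    rw [List.foldl_cons]
    by_cases hcell : pvCell board p.1 p.2 = 0
    · have hb : pvBlankP board p := ⟨hgrid, hcell⟩
      have hpe := pvPathExists_spec board visited p.1 p.2 hM hb
      set r := pvPathExists board (pvRowsI board - 1) (pvColsI board - 1) visited p.1 p.2 with hr
      have hstep : pvStepA board (true, visited) p = (r.1, r.2) := by
        simp [pvStepA, hcell, ← hr]
      rw [hstep]
      cases hr1 : r.1 with
      | true =>
        have hconn : pvConn board p := hpe.1.mp hr1
        rw [ih r.2 hpe.2 (fun q hq => hL q (by simp [hq]))]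
        constructor
        · intro h q hq hcq
          rcases List.mem_cons.mp hq with rfl | hq'
          · exact hconn
          · exact h q hq' hcq
        · intro h q hq hcq
          exact h q (by simp [hq]) hcq
      | false =>
        refine iff_of_false (by simp [pvLoopA_false board L r.2]) ?_
        intro h
        have hc := hpe.1.mpr (h p (by simp) hcell)
        rw [hr1] at hc
        exact absurd hc (by simp)
    · have hstep : pvStepA board (true, visited) p = (true, visited) := by simp [pvStepA, hcell]
      rw [hstep, ih visited hM (fun q hq => hL q (by simp [hq]))]
      constructor
      · intro h q hq hcq
        rcases List.mem_cons.mp hq with rfl | hq'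
        · exact absurd hcq hcell
        · exact h q hq' hcq
      · intro h q hq hcq
        exact h q (by simp [hq]) hcq

theorem pvA_iff (board : List (List Int)) (hne : board ≠ []) :
    isLegalBoard board = true ↔
      ∀ p ∈ pvCellsRC (pvRowsI board) (pvColsI board),
        pvCell board p.1 p.2 = 0 → pvConn board p := by
  have hE : isLegalBoard board
      = ((pvCellsRC (pvRowsI board) (pvColsI board)).foldl (pvStepA board)
          (true, PySem.Dict.empty)).1 := by
    unfold isLegalBoard
    rw [if_neg hne, pvCellsRC, List.foldl_flatMap]
    simp only [List.foldl_map]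
    rfl
  rw [hE]
  apply pvLoopA_spec
  · intro p b h
    rw [show (PySem.Dict.empty : PySem.Dict (Int × Int) Bool).get? p = none from by simp] at h
    cases h
  · intro p hp
    have h := mem_pvCellsRC.mp hp
    exact ⟨h.1, h.2.1, h.2.2.1, h.2.2.2⟩

-- ---- B-side ----

theorem pvSeeds_flatMap (board : List (List Int)) :
    (PySem.List.pyRange 0 (pvRowsI board)).foldl
      (fun acc r => (PySem.List.pyRange 0 (pvColsI board)).foldl
        (fun acc c =>
          if (decide (r = 0 ∨ c = 0 ∨ r = pvRowsI board - 1 ∨ c = pvColsI board - 1)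
              && decide (pvCell board r c = 0)) = true
          then acc ++ [(r, c)] else acc)
        acc) []
    = (PySem.List.pyRange 0 (pvRowsI board)).flatMap
        (fun r => ((PySem.List.pyRange 0 (pvColsI board)).filter
          (fun c => decide (r = 0 ∨ c = 0 ∨ r = pvRowsI board - 1 ∨ c = pvColsI board - 1)
              && decide (pvCell board r c = 0))).map (fun c => (r, c))) := by
  have h1 : (PySem.List.pyRange 0 (pvRowsI board)).foldl
      (fun acc r => (PySem.List.pyRange 0 (pvColsI board)).foldl
        (fun acc c =>
          if (decide (r = 0 ∨ c = 0 ∨ r = pvRowsI board - 1 ∨ c = pvColsI board - 1)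
              && decide (pvCell board r c = 0)) = true
          then acc ++ [(r, c)] else acc)
        acc) []
      = (PySem.List.pyRange 0 (pvRowsI board)).foldl
        (fun acc r => acc ++ ((PySem.List.pyRange 0 (pvColsI board)).filter
          (fun c => decide (r = 0 ∨ c = 0 ∨ r = pvRowsI board - 1 ∨ c = pvColsI board - 1)
              && decide (pvCell board r c = 0))).map (fun c => (r, c))) [] :=
    PySem.List.foldl_congr_mem _ _ _ _ (fun acc r _ => PySem.List.foldl_append_if _ _ _ _)
  rw [h1, PySem.List.foldl_append_eq_flatMap]
  rfl

theorem pvSeeds_mem (board : List (List Int)) (q : Int × Int) :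
    q ∈ (PySem.List.pyRange 0 (pvRowsI board)).flatMap
        (fun r => ((PySem.List.pyRange 0 (pvColsI board)).filter
          (fun c => decide (r = 0 ∨ c = 0 ∨ r = pvRowsI board - 1 ∨ c = pvColsI board - 1)
              && decide (pvCell board r c = 0))).map (fun c => (r, c)))
      ↔ (pvBlankP board q ∧ pvBorderP board q) := by
  obtain ⟨x, y⟩ := q
  simp only [List.mem_flatMap, List.mem_map, List.mem_filter,
    PySem.List.mem_pyRange_one, Bool.and_eq_true, decide_eq_true_eq]
  constructor
  · rintro ⟨r, hr, c, ⟨hc, hbd, hcell⟩, h⟩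
    rw [Prod.mk.injEq] at h
    obtain ⟨rfl, rfl⟩ := h
    exact ⟨⟨⟨hr.1, hr.2, hc.1, hc.2⟩, hcell⟩, hbd⟩
  · rintro ⟨⟨⟨h1, h2, h3, h4⟩, hcell⟩, hbd⟩
    exact ⟨x, ⟨h1, h2⟩, y, ⟨⟨h3, h4⟩, hbd, hcell⟩, rfl⟩

theorem pvSeeds_nodup (board : List (List Int)) :
    ((PySem.List.pyRange 0 (pvRowsI board)).flatMap
        (fun r => ((PySem.List.pyRange 0 (pvColsI board)).filter
          (fun c => decide (r = 0 ∨ c = 0 ∨ r = pvRowsI board - 1 ∨ c = pvColsI board - 1)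
              && decide (pvCell board r c = 0))).map (fun c => (r, c)))).Nodup := by
  rw [List.nodup_flatMap]
  constructor
  · intro r _
    exact ((PySem.List.nodup_pyRange_one 0 (pvColsI board)).filter _).map
      (fun a b h => ((Prod.mk.injEq ..).mp h).2)
  · apply (PySem.List.pairwise_lt_pyRange_one 0 (pvRowsI board)).imp
    intro a b hlt x hxa hxb
    simp only [List.mem_map, List.mem_filter] at hxa hxb
    obtain ⟨c1, _, h1⟩ := hxa
    obtain ⟨c2, _, h2⟩ := hxb
    rw [← h2, Prod.mk.injEq] at h1
    omega

theorem pvFlood_spec (board : List (List Int)) :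
    ∀ (reached : PySem.Set (Int × Int)) (stack : List (Int × Int)),
      (∀ p ∈ reached, pvBlankP board p ∧ pvConn board p) →
      (∀ p ∈ stack, p ∈ reached) → stack.Nodup →
      (∀ p ∈ reached, p ∉ stack → ∀ q ∈ pvNbrs p.1 p.2, pvBlankP board q → q ∈ reached) →
      (∀ p ∈ reached, p ∈ pvFlood board (pvRowsI board) (pvColsI board) reached stack) ∧
      (∀ p ∈ pvFlood board (pvRowsI board) (pvColsI board) reached stack,
        pvBlankP board p ∧ pvConn board p) ∧
      (∀ p ∈ pvFlood board (pvRowsI board) (pvColsI board) reached stack,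
        ∀ q ∈ pvNbrs p.1 p.2, pvBlankP board q →
          q ∈ pvFlood board (pvRowsI board) (pvColsI board) reached stack) := by
  intro reached stack
  induction reached, stack using pvFlood.induct (board := board)
    (rows := pvRowsI board) (cols := pvColsI board) with
  | case1 reached =>
    intro hI1 _ _ hI3
    rw [show pvFlood board (pvRowsI board) (pvColsI board) reached [] = reached from by rw [pvFlood]]
    exact ⟨fun p hp => hp, hI1, fun p hp q hq hbq => hI3 p hp (List.not_mem_nil) q hq hbq⟩
  | case2 reached r c rest new ih =>
    intro hI1 hI2a hI2b hI3
    have hnew : new = (pvNbrs r c).filter (pvNbrOk board (pvRowsI board) (pvColsI board) reached) := rfl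
    have hstep : pvFlood board (pvRowsI board) (pvColsI board) reached ((r, c) :: rest)
        = pvFlood board (pvRowsI board) (pvColsI board) (reached.update new) (new.reverse ++ rest) := by
      rw [pvFlood]
    have hnf := pvNew_facts board (pvRowsI board) (pvColsI board) reached r c
    rw [← hnew] at hnf
    have hblanknew : ∀ q ∈ new, pvBlankP board q ∧ q ∉ reached := by
      intro q hq
      have hok := (List.mem_filter.mp (hnew ▸ hq)).2
      simp only [pvNbrOk, Bool.and_eq_true, decide_eq_true_eq, Bool.not_eq_true'] at hok
      exact ⟨⟨⟨hok.1.1.1.1, hok.1.1.1.2, hok.1.1.2.1, hok.1.1.2.2⟩, hok.2⟩,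
        fun hmem => (Bool.eq_false_iff.mp hok.1.2) ((PySem.Set.contains_iff reached q).mpr hmem)⟩
    have hupd : reached.update new = reached ++ new :=
      PySem.Set.update_eq_append_of_disjoint reached new hnf.1
        (fun x hx => (hblanknew x hx).2)
    have hrc : ((r, c) : Int × Int) ∈ reached := hI2a _ (by simp)
    have hconnrc : pvConn board (r, c) := (hI1 _ hrc).2
    have hI1' : ∀ p ∈ reached.update new, pvBlankP board p ∧ pvConn board p := by
      rw [hupd]
      intro p hp
      rcases List.mem_append.mp hp with h | h
      · exact hI1 p h
      · refine ⟨(hblanknew p h).1, ?_⟩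
        exact pvConn.step (r, c) p hconnrc (List.mem_filter.mp (hnew ▸ h)).1 (hblanknew p h).1
    have hI2a' : ∀ p ∈ new.reverse ++ rest, p ∈ reached.update new := by
      rw [hupd]
      intro p hp
      rcases List.mem_append.mp hp with h | h
      · exact List.mem_append.mpr (Or.inr (List.mem_reverse.mp h))
      · exact List.mem_append.mpr (Or.inl (hI2a p (by simp [h])))
    have hI2b' : (new.reverse ++ rest).Nodup := by
      rw [List.nodup_append]
      refine ⟨by rw [List.nodup_reverse]; exact hnf.1, hI2b.of_cons, ?_⟩
      intro a ha b hb hab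
      subst hab
      exact (hblanknew a (List.mem_reverse.mp ha)).2 (hI2a a (by simp [hb]))
    have hI3' : ∀ p ∈ reached.update new, p ∉ new.reverse ++ rest →
        ∀ q ∈ pvNbrs p.1 p.2, pvBlankP board q → q ∈ reached.update new := by
      rw [hupd]
      intro p hp hpns q hq hbq
      rcases List.mem_append.mp hp with h | h
      · by_cases hpeq : p = (r, c)
        · subst hpeq
          by_cases hqr : q ∈ reached
          · exact List.mem_append.mpr (Or.inl hqr)
          · refine List.mem_append.mpr (Or.inr ?_)
            rw [hnew]
            rw [List.mem_filter]
            refine ⟨hq, ?_⟩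
            simp only [pvNbrOk, Bool.and_eq_true, decide_eq_true_eq, Bool.not_eq_true']
            refine ⟨⟨⟨⟨hbq.1.1, hbq.1.2.1⟩, hbq.1.2.2.1, hbq.1.2.2.2⟩, ?_⟩, hbq.2⟩
            rw [Bool.eq_false_iff]
            intro hc
            exact hqr ((PySem.Set.contains_iff reached q).mp hc)
        · have hpo : p ∉ ((r, c) :: rest) := by
            rw [List.mem_cons, not_or]
            exact ⟨hpeq, fun hpr => hpns (List.mem_append.mpr (Or.inr hpr))⟩
          exact List.mem_append.mpr (Or.inl (hI3 p h hpo q hq hbq))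
      · exfalso
        exact hpns (List.mem_append.mpr (Or.inl (List.mem_reverse.mpr h)))
    obtain ⟨hc1, hc2, hc3⟩ := ih hI1' hI2a' hI2b' hI3'
    rw [hstep]
    exact ⟨fun p hp => hc1 p (by rw [hupd]; exact List.mem_append.mpr (Or.inl hp)), hc2, hc3⟩

theorem pvB_iff (board : List (List Int)) (hne : board ≠ []) :
    isLegalBoard_alt board = true ↔
      ∀ p ∈ pvCellsRC (pvRowsI board) (pvColsI board),
        pvCell board p.1 p.2 = 0 → pvConn board p := by
  have hmain : isLegalBoard_alt board
      = (PySem.List.pyRange 0 (pvRowsI board)).all (fun r =>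
          (PySem.List.pyRange 0 (pvColsI board)).all (fun c =>
            !(decide (pvCell board r c = 0)) || PySem.Set.contains
              (pvFlood board (pvRowsI board) (pvColsI board)
                (PySem.Set.ofList ((PySem.List.pyRange 0 (pvRowsI board)).foldl
                  (fun acc r => (PySem.List.pyRange 0 (pvColsI board)).foldl
                    (fun acc c =>
                      if (decide (r = 0 ∨ c = 0 ∨ r = pvRowsI board - 1 ∨ c = pvColsI board - 1)
                          && decide (pvCell board r c = 0)) = true
                      then acc ++ [(r, c)] else acc)
                    acc) []))
                ((PySem.List.pyRange 0 (pvRowsI board)).foldl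
                  (fun acc r => (PySem.List.pyRange 0 (pvColsI board)).foldl
                    (fun acc c =>
                      if (decide (r = 0 ∨ c = 0 ∨ r = pvRowsI board - 1 ∨ c = pvColsI board - 1)
                          && decide (pvCell board r c = 0)) = true
                      then acc ++ [(r, c)] else acc)
                    acc) []))
              (r, c))) := by
    unfold isLegalBoard_alt
    rw [if_neg hne]
    rfl
  rw [hmain, pvSeeds_flatMap board]
  set SE := (PySem.List.pyRange 0 (pvRowsI board)).flatMap
      (fun r => ((PySem.List.pyRange 0 (pvColsI board)).filter
        (fun c => decide (r = 0 ∨ c = 0 ∨ r = pvRowsI board - 1 ∨ c = pvColsI board - 1)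
            && decide (pvCell board r c = 0))).map (fun c => (r, c))) with hSE
  have hnodup : SE.Nodup := pvSeeds_nodup board
  have hofl : PySem.Set.ofList SE = SE := PySem.Set.ofList_eq_self_of_nodup SE hnodup
  rw [hofl]
  have hmem : ∀ q, q ∈ SE ↔ (pvBlankP board q ∧ pvBorderP board q) :=
    fun q => pvSeeds_mem board q
  have hfl := pvFlood_spec board SE SE
    (fun p hp => ⟨((hmem p).mp hp).1, pvConn.base p ((hmem p).mp hp).1 ((hmem p).mp hp).2⟩)
    (fun p hp => hp) hnodup
    (fun p hp hnp => absurd hp hnp)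
  obtain ⟨hsub, hRconn, hRclosed⟩ := hfl
  set R := pvFlood board (pvRowsI board) (pvColsI board) SE SE with hR
  have hconnR : ∀ p, pvConn board p → p ∈ R := by
    intro p hc
    induction hc with
    | base p hb hbd => exact hsub p ((hmem p).mpr ⟨hb, hbd⟩)
    | step p q hc hq hbq ih => exact hRclosed p ih q hq hbq
  rw [show (PySem.List.pyRange 0 (pvRowsI board)).all (fun r =>
        (PySem.List.pyRange 0 (pvColsI board)).all (fun c =>
          !(decide (pvCell board r c = 0)) || PySem.Set.contains R (r, c)))
      = (pvCellsRC (pvRowsI board) (pvColsI board)).all (fun q =>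
          !(decide (pvCell board q.1 q.2 = 0)) || PySem.Set.contains R q) from by
    rw [pvCellsRC, List.all_flatMap]
    simp only [List.all_map]
    rfl]
  rw [List.all_eq_true]
  constructor
  · intro h p hp hcell
    have hb := h p hp
    simp only [Bool.or_eq_true, Bool.not_eq_true', decide_eq_false_iff_not] at hb
    rcases hb with hb | hb
    · exact absurd hcell hb
    · exact (hRconn p ((PySem.Set.contains_iff R p).mp hb)).2
  · intro h p hp
    simp only [Bool.or_eq_true, Bool.not_eq_true', decide_eq_false_iff_not]
    by_cases hcell : pvCell board p.1 p.2 = 0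
    · exact Or.inr ((PySem.Set.contains_iff R p).mpr (hconnR p (h p hp hcell)))
    · exact Or.inl hcell

-- ===== VERDICT (by name: the statement is the Claim_ definition above) =====
theorem isLegalBoard_spec : Claim_equal_isLegalBoard := by
  intro board _ _
  unfold Spec_isLegalBoard
  by_cases hne : board = []
  · subst hne; rfl
  · have hA := pvA_iff board hne
    have hB := pvB_iff board hne
    cases hA' : isLegalBoard board <;> cases hB' : isLegalBoard_alt board <;> simp_all
    obtain ⟨x, y, hm, hc, hn⟩ := hA
    exact hn (hB x y hm hc)
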